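-- pv_equiv track=rewrite | github.com/leesok23/Algorithms | 프로그래머스/Lv. 1/모의고사.py | solution
-- ===== SOURCE A (Python) =====
-- def solution(answers):
--     student1 = [1,2,3,4,5]
--     student2 = [2,1,2,3,2,4,2,5]
--     student3 = [3,3,1,1,2,2,4,4,5,5]
--
--     counts = [0] * 3
--     for i in range(len(answers)):
--         if answers[i] == student1[i%len(student1)]:
--             counts[0] += 1
--         if answers[i] == student2[i%len(student2)]:
--             counts[1] += 1
--         if answers[i] == student3[i%len(student3)]:
--             counts[2] += 1
--
--     return [i+1 for i, count in enumerate(counts) if count==max(counts)]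
-- ===== SOURCE B (Python) =====
-- def solution(answers):
--     # Bucket-count approach: the three patterns (lengths 5, 8, 10) jointly repeat
--     # with period 40, so build one frequency table keyed by (i % 40, answer value);
--     # each student's score is then a fixed 40-term table lookup, no per-pattern scan.
--     freq = {}
--     for i, a in enumerate(answers):
--         key = (i % 40, a)
--         freq[key] = freq.get(key, 0) + 1
--     patterns = [[1, 2, 3, 4, 5],
--                 [2, 1, 2, 3, 2, 4, 2, 5],
--                 [3, 3, 1, 1, 2, 2, 4, 4, 5, 5]]
--     counts = [sum(freq.get((r, p[r % len(p)]), 0) for r in range(40))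
--               for p in patterns]
--     best = max(counts)
--     return [i + 1 for i, c in enumerate(counts) if c == best]
-- ===== Notes on version B (the rewrite author's own statement) =====
-- stated objective: alternative
-- what changed: Replaces A's per-element comparison against each pattern with a bucket-counting algorithm: one pass builds a frequency table keyed by (index mod 40, answer) - 40 being the common period of the three patterns - and each student's score is then read off as a fixed 40-term sum of table lookups, with no per-pattern scan of the answers.
import Mathlib
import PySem

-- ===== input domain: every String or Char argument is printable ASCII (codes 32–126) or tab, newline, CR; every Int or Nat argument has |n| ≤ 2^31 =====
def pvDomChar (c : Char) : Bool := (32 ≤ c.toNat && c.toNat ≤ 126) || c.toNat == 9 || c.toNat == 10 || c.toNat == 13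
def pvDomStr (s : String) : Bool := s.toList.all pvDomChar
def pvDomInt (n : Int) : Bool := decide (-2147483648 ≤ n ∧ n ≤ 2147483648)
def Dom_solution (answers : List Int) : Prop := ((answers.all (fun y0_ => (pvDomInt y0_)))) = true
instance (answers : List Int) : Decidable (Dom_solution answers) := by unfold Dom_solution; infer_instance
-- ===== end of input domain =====

-- B replaces A's per-element comparison against each pattern by a bucket-count: one pass builds a
-- frequency table keyed by (i mod 40, answer) (40 = common period of the patterns), then each score
-- is a fixed 40-term sum of table lookups; alternative algorithm, same asymptotic cost.


-- ===== PORT A =====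
-- literal transliteration of A: one loop over range(len(answers)), mutating counts (a length-3 list)
-- via pyGetD/pySetD (indices 0,1,2 and i % len(studentk) are always in range, so the total forms are exact).
def solution (answers : List Int) : List Int :=
  let student1 : List Int := [1, 2, 3, 4, 5]
  let student2 : List Int := [2, 1, 2, 3, 2, 4, 2, 5]
  let student3 : List Int := [3, 3, 1, 1, 2, 2, 4, 4, 5, 5]
  let counts : List Int :=
    (PySem.List.pyRange 0 answers.length 1).foldl (fun counts i =>
      let counts :=
        if PySem.List.pyGetD answers i 0 = PySem.List.pyGetD student1 (PySem.Int.mod i student1.length) 0 then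
          PySem.List.pySetD counts 0 (PySem.List.pyGetD counts 0 0 + 1)
        else counts
      let counts :=
        if PySem.List.pyGetD answers i 0 = PySem.List.pyGetD student2 (PySem.Int.mod i student2.length) 0 then
          PySem.List.pySetD counts 1 (PySem.List.pyGetD counts 1 0 + 1)
        else counts
      let counts :=
        if PySem.List.pyGetD answers i 0 = PySem.List.pyGetD student3 (PySem.Int.mod i student3.length) 0 then
          PySem.List.pySetD counts 2 (PySem.List.pyGetD counts 2 0 + 1)
        else counts
      counts) [0, 0, 0]
  -- max(counts): counts always has 3 elements, so max? is some; getD 0 is exact here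
  let m := (PySem.List.max? counts (fun x => x)).getD 0
  (PySem.List.enumerate counts 0).filterMap (fun ic => if ic.2 = m then some (ic.1 + 1) else none)

-- ===== PORT B =====
-- transliteration of Source B: frequency dict keyed by (i % 40, a), built with freq[key] = freq.get(key, 0) + 1;
-- then counts = [sum(freq.get((r, p[r % len(p)]), 0) for r in range(40)) for p in patterns].
def solution_alt (answers : List Int) : List Int :=
  let freq : PySem.Dict (Int × Int) Int :=
    (PySem.List.enumerate answers 0).foldl
      (fun d ia =>
        d.insert (PySem.Int.mod ia.1 40, ia.2) (d.getD (PySem.Int.mod ia.1 40, ia.2) 0 + 1))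
      PySem.Dict.empty
  let patterns : List (List Int) :=
    [[1, 2, 3, 4, 5], [2, 1, 2, 3, 2, 4, 2, 5], [3, 3, 1, 1, 2, 2, 4, 4, 5, 5]]
  let counts : List Int := patterns.map (fun p =>
    ((PySem.List.pyRange 0 40 1).map
      (fun r => freq.getD (r, PySem.List.pyGetD p (PySem.Int.mod r p.length) 0) 0)).sum)
  let best := (PySem.List.max? counts (fun x => x)).getD 0
  (PySem.List.enumerate counts 0).filterMap (fun ic => if ic.2 = best then some (ic.1 + 1) else none)

-- ===== PRECONDITION & SPEC =====
def Spec_solution (answers : List Int) (out : List Int) : Prop := out = solution_alt answers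
instance (answers : List Int) (out : List Int) : Decidable (Spec_solution answers out) := by unfold Spec_solution; infer_instance

-- ===== CLAIM =====
def Claim_equal_solution : Prop := ∀ (answers : List Int), Dom_solution answers → Spec_solution answers (solution answers)

-- ===== LEMMAS AND PROOFS =====

-- ---- A side: the interleaved loop computes three 0/1-indicator sums ----
lemma pv_step_eval (P1 P2 P3 : Prop) [Decidable P1] [Decidable P2] [Decidable P3] (c0 c1 c2 : Int) :
    (let counts := if P1 then PySem.List.pySetD ([c0, c1, c2] : List Int) 0 (PySem.List.pyGetD ([c0, c1, c2] : List Int) 0 0 + 1) else [c0, c1, c2]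
     let counts := if P2 then PySem.List.pySetD counts 1 (PySem.List.pyGetD counts 1 0 + 1) else counts
     let counts := if P3 then PySem.List.pySetD counts 2 (PySem.List.pyGetD counts 2 0 + 1) else counts
     counts)
    = [c0 + (if P1 then (1:Int) else 0), c1 + (if P2 then (1:Int) else 0), c2 + (if P3 then (1:Int) else 0)] := by
  split_ifs <;>
    simp [PySem.List.pySetD, PySem.List.pySet?, PySem.List.pyGetD, PySem.List.pyGet?, PySem.List.pyIdx?]

lemma pv_key (l : List (Int × Int)) : ∀ (c0 c1 c2 : Int),
    l.foldl (fun (counts : List Int) (ia : Int × Int) =>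
      let counts :=
        if ia.2 = PySem.List.pyGetD [1, 2, 3, 4, 5] (PySem.Int.mod ia.1 5) 0 then
          PySem.List.pySetD counts 0 (PySem.List.pyGetD counts 0 0 + 1)
        else counts
      let counts :=
        if ia.2 = PySem.List.pyGetD [2, 1, 2, 3, 2, 4, 2, 5] (PySem.Int.mod ia.1 8) 0 then
          PySem.List.pySetD counts 1 (PySem.List.pyGetD counts 1 0 + 1)
        else counts
      let counts :=
        if ia.2 = PySem.List.pyGetD [3, 3, 1, 1, 2, 2, 4, 4, 5, 5] (PySem.Int.mod ia.1 10) 0 then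
          PySem.List.pySetD counts 2 (PySem.List.pyGetD counts 2 0 + 1)
        else counts
      counts) [c0, c1, c2]
    = [c0 + (l.map (fun ia => if ia.2 = PySem.List.pyGetD [1, 2, 3, 4, 5] (PySem.Int.mod ia.1 5) 0 then (1 : Int) else 0)).sum,
       c1 + (l.map (fun ia => if ia.2 = PySem.List.pyGetD [2, 1, 2, 3, 2, 4, 2, 5] (PySem.Int.mod ia.1 8) 0 then (1 : Int) else 0)).sum,
       c2 + (l.map (fun ia => if ia.2 = PySem.List.pyGetD [3, 3, 1, 1, 2, 2, 4, 4, 5, 5] (PySem.Int.mod ia.1 10) 0 then (1 : Int) else 0)).sum] := by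
  induction l with
  | nil => intro c0 c1 c2; simp
  | cons hd tl ih =>
    intro c0 c1 c2
    have hstep :
        (let counts :=
          if hd.2 = PySem.List.pyGetD [1, 2, 3, 4, 5] (PySem.Int.mod hd.1 5) 0 then
            PySem.List.pySetD ([c0, c1, c2] : List Int) 0 (PySem.List.pyGetD ([c0, c1, c2] : List Int) 0 0 + 1)
          else [c0, c1, c2]
        let counts :=
          if hd.2 = PySem.List.pyGetD [2, 1, 2, 3, 2, 4, 2, 5] (PySem.Int.mod hd.1 8) 0 then
            PySem.List.pySetD counts 1 (PySem.List.pyGetD counts 1 0 + 1)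
          else counts
        let counts :=
          if hd.2 = PySem.List.pyGetD [3, 3, 1, 1, 2, 2, 4, 4, 5, 5] (PySem.Int.mod hd.1 10) 0 then
            PySem.List.pySetD counts 2 (PySem.List.pyGetD counts 2 0 + 1)
          else counts
        counts)
        = [c0 + (if hd.2 = PySem.List.pyGetD [1, 2, 3, 4, 5] (PySem.Int.mod hd.1 5) 0 then (1:Int) else 0),
           c1 + (if hd.2 = PySem.List.pyGetD [2, 1, 2, 3, 2, 4, 2, 5] (PySem.Int.mod hd.1 8) 0 then (1:Int) else 0),
           c2 + (if hd.2 = PySem.List.pyGetD [3, 3, 1, 1, 2, 2, 4, 4, 5, 5] (PySem.Int.mod hd.1 10) 0 then (1:Int) else 0)] :=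
      pv_step_eval _ _ _ c0 c1 c2
    rw [List.foldl_cons]
    rw [hstep]
    rw [ih]
    simp only [List.map_cons, List.sum_cons, List.cons.injEq, and_true]
    exact ⟨by ring, by ring, by ring⟩

lemma pv_foldl_pair {β : Type} (F : β → Int × Int → β) (g : Int → Int) :
    ∀ (l : List Int) (init : β),
      l.foldl (fun c i => F c (i, g i)) init = (l.map (fun j => (j, g j))).foldl F init := by
  intro l
  induction l with
  | nil => intro init; rfl
  | cons hd tl ih => intro init; simpa using ih (F init (hd, g hd))

lemma pv_counts (answers : List Int) :
    (PySem.List.pyRange 0 (answers.length : Int) 1).foldl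
      (fun (counts : List Int) (i : Int) =>
      let counts :=
        if PySem.List.pyGetD answers i 0 = PySem.List.pyGetD [1, 2, 3, 4, 5] (PySem.Int.mod i 5) 0 then
          PySem.List.pySetD counts 0 (PySem.List.pyGetD counts 0 0 + 1)
        else counts
      let counts :=
        if PySem.List.pyGetD answers i 0 = PySem.List.pyGetD [2, 1, 2, 3, 2, 4, 2, 5] (PySem.Int.mod i 8) 0 then
          PySem.List.pySetD counts 1 (PySem.List.pyGetD counts 1 0 + 1)
        else counts
      let counts :=
        if PySem.List.pyGetD answers i 0 = PySem.List.pyGetD [3, 3, 1, 1, 2, 2, 4, 4, 5, 5] (PySem.Int.mod i 10) 0 then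
          PySem.List.pySetD counts 2 (PySem.List.pyGetD counts 2 0 + 1)
        else counts
      counts) [0, 0, 0]
    = [((PySem.List.enumerate answers 0).map (fun ia => if ia.2 = PySem.List.pyGetD [1, 2, 3, 4, 5] (PySem.Int.mod ia.1 5) 0 then (1 : Int) else 0)).sum,
       ((PySem.List.enumerate answers 0).map (fun ia => if ia.2 = PySem.List.pyGetD [2, 1, 2, 3, 2, 4, 2, 5] (PySem.Int.mod ia.1 8) 0 then (1 : Int) else 0)).sum,
       ((PySem.List.enumerate answers 0).map (fun ia => if ia.2 = PySem.List.pyGetD [3, 3, 1, 1, 2, 2, 4, 4, 5, 5] (PySem.Int.mod ia.1 10) 0 then (1 : Int) else 0)).sum] := by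
  have hb :
      (fun (counts : List Int) (i : Int) =>
      let counts :=
        if PySem.List.pyGetD answers i 0 = PySem.List.pyGetD [1, 2, 3, 4, 5] (PySem.Int.mod i 5) 0 then
          PySem.List.pySetD counts 0 (PySem.List.pyGetD counts 0 0 + 1)
        else counts
      let counts :=
        if PySem.List.pyGetD answers i 0 = PySem.List.pyGetD [2, 1, 2, 3, 2, 4, 2, 5] (PySem.Int.mod i 8) 0 then
          PySem.List.pySetD counts 1 (PySem.List.pyGetD counts 1 0 + 1)
        else counts
      let counts :=
        if PySem.List.pyGetD answers i 0 = PySem.List.pyGetD [3, 3, 1, 1, 2, 2, 4, 4, 5, 5] (PySem.Int.mod i 10) 0 then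
          PySem.List.pySetD counts 2 (PySem.List.pyGetD counts 2 0 + 1)
        else counts
      counts)
      = (fun (counts : List Int) (i : Int) =>
          (fun (counts : List Int) (ia : Int × Int) =>
      let counts :=
        if ia.2 = PySem.List.pyGetD [1, 2, 3, 4, 5] (PySem.Int.mod ia.1 5) 0 then
          PySem.List.pySetD counts 0 (PySem.List.pyGetD counts 0 0 + 1)
        else counts
      let counts :=
        if ia.2 = PySem.List.pyGetD [2, 1, 2, 3, 2, 4, 2, 5] (PySem.Int.mod ia.1 8) 0 then
          PySem.List.pySetD counts 1 (PySem.List.pyGetD counts 1 0 + 1)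
        else counts
      let counts :=
        if ia.2 = PySem.List.pyGetD [3, 3, 1, 1, 2, 2, 4, 4, 5, 5] (PySem.Int.mod ia.1 10) 0 then
          PySem.List.pySetD counts 2 (PySem.List.pyGetD counts 2 0 + 1)
        else counts
      counts) counts (i, PySem.List.pyGetD answers i 0)) := rfl
  rw [hb, pv_foldl_pair
      (fun (counts : List Int) (ia : Int × Int) =>
      let counts :=
        if ia.2 = PySem.List.pyGetD [1, 2, 3, 4, 5] (PySem.Int.mod ia.1 5) 0 then
          PySem.List.pySetD counts 0 (PySem.List.pyGetD counts 0 0 + 1)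
        else counts
      let counts :=
        if ia.2 = PySem.List.pyGetD [2, 1, 2, 3, 2, 4, 2, 5] (PySem.Int.mod ia.1 8) 0 then
          PySem.List.pySetD counts 1 (PySem.List.pyGetD counts 1 0 + 1)
        else counts
      let counts :=
        if ia.2 = PySem.List.pyGetD [3, 3, 1, 1, 2, 2, 4, 4, 5, 5] (PySem.Int.mod ia.1 10) 0 then
          PySem.List.pySetD counts 2 (PySem.List.pyGetD counts 2 0 + 1)
        else counts
      counts)
      (fun (j : Int) => PySem.List.pyGetD answers j 0) (PySem.List.pyRange 0 (answers.length : Int) 1) [0, 0, 0]]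
  rw [show ((answers.length : Int)) = PySem.List.len answers from (PySem.List.len_eq answers).symm,
      ← PySem.List.enumerate_eq_map_pyRange answers 0, pv_key]
  norm_num

-- ---- B side: the bucket-count sums equal the same indicator sums ----

-- exactly-one-hit: summing the hit indicator of (m, v) over a Nodup list of residues
lemma pv_single (g : Int → Int) (v : Int) :
    ∀ (L : List Int) (m : Int), L.Nodup →
      (L.map (fun r => if ((m, v) : Int × Int) = (r, g r) then (1:Int) else 0)).sum
        = if m ∈ L ∧ v = g m then 1 else 0 := by
  intro L
  induction L with
  | nil => intro m _; simp
  | cons a L ih =>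
    intro m hnd
    have hndL : L.Nodup := hnd.of_cons
    rw [List.map_cons, List.sum_cons, ih m hndL]
    by_cases hma : m = a
    · subst hma
      have hmL : m ∉ L := (List.nodup_cons.mp hnd).1
      by_cases hv : v = g m
      · simp [hv, hmL]
      · simp [hv, Prod.ext_iff, hmL]
    · have h1 : ((m, v) : Int × Int) = (a, g a) ↔ False := by
        simp [Prod.ext_iff]; intro h; exact absurd h hma
      simp [h1, List.mem_cons, hma]

-- swapping the order of summation: Σ_{r<40} #{i : (i%40, aᵢ) = (r, g r)} = Σ_i [aᵢ = g (i%40)]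
lemma pv_swap (g : Int → Int) (l : List (Int × Int)) :
    ((PySem.List.pyRange 0 40 1).map
      (fun r => (((l.map (fun ia => (PySem.Int.mod ia.1 40, ia.2))).count (r, g r) : Int)))).sum
    = (l.map (fun ia => if ia.2 = g (PySem.Int.mod ia.1 40) then (1:Int) else 0)).sum := by
  induction l with
  | nil => simp
  | cons hd tl ih =>
    have hsplit :
        ((PySem.List.pyRange 0 40 1).map
          (fun r => ((((hd :: tl).map (fun ia => (PySem.Int.mod ia.1 40, ia.2))).count (r, g r) : Int)))).sum
        = ((PySem.List.pyRange 0 40 1).map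
            (fun r => (((tl.map (fun ia => (PySem.Int.mod ia.1 40, ia.2))).count (r, g r) : Int)))).sum
          + ((PySem.List.pyRange 0 40 1).map
            (fun r => if ((PySem.Int.mod hd.1 40, hd.2) : Int × Int) = (r, g r) then (1:Int) else 0)).sum := by
      rw [← PySem.List.sum_map_add_int]
      apply congrArg
      apply List.map_congr_left
      intro r _
      rw [List.map_cons, List.count_cons]
      push_cast
      ring_nf
      by_cases h : ((PySem.Int.mod hd.1 40, hd.2) : Int × Int) = (r, g r)
      · simp [h]
      · simp [h]
    rw [hsplit, ih]
    have hm0 : 0 ≤ PySem.Int.mod hd.1 40 := by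
      rw [PySem.Int.mod_eq_emod_of_pos (by norm_num)]
      exact Int.emod_nonneg _ (by norm_num)
    have hm40 : PySem.Int.mod hd.1 40 < 40 := by
      rw [PySem.Int.mod_eq_emod_of_pos (by norm_num)]
      exact Int.emod_lt_of_pos _ (by norm_num)
    have hmem : PySem.Int.mod hd.1 40 ∈ PySem.List.pyRange 0 40 1 :=
      (PySem.List.mem_pyRange_one).mpr ⟨hm0, hm40⟩
    rw [pv_single g hd.2 _ _ (PySem.List.nodup_pyRange_one 0 40)]
    simp only [List.map_cons, List.sum_cons, hmem, true_and]
    ring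

-- i % 40 % L = i % L for the pattern lengths L ∣ 40
lemma pv_mod_mod (L : Int) (hL : 0 < L) (hdvd : L ∣ 40) (i : Int) :
    PySem.Int.mod (PySem.Int.mod i 40) L = PySem.Int.mod i L := by
  rw [PySem.Int.mod_eq_emod_of_pos hL, PySem.Int.mod_eq_emod_of_pos hL,
      PySem.Int.mod_eq_emod_of_pos (by norm_num : (0:Int) < 40)]
  exact Int.emod_emod_of_dvd i hdvd

-- B's per-pattern bucket sum equals the indicator sum over the answers
lemma pv_bucket (answers : List Int) (p : List Int) (hL : 0 < (p.length : Int)) (hdvd : (p.length : Int) ∣ 40) :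
    ((PySem.List.pyRange 0 40 1).map
      (fun r => ((PySem.List.enumerate answers 0).foldl
        (fun (d : PySem.Dict (Int × Int) Int) ia =>
          d.insert (PySem.Int.mod ia.1 40, ia.2) (d.getD (PySem.Int.mod ia.1 40, ia.2) 0 + 1))
        PySem.Dict.empty).getD (r, PySem.List.pyGetD p (PySem.Int.mod r p.length) 0) 0)).sum
    = ((PySem.List.enumerate answers 0).map
        (fun ia => if ia.2 = PySem.List.pyGetD p (PySem.Int.mod ia.1 p.length) 0 then (1:Int) else 0)).sum := by
  have hfold :
      (PySem.List.enumerate answers 0).foldl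
        (fun (d : PySem.Dict (Int × Int) Int) ia =>
          d.insert (PySem.Int.mod ia.1 40, ia.2) (d.getD (PySem.Int.mod ia.1 40, ia.2) 0 + 1))
        PySem.Dict.empty
      = ((PySem.List.enumerate answers 0).map (fun ia => (PySem.Int.mod ia.1 40, ia.2))).foldl
          (fun (d : PySem.Dict (Int × Int) Int) x => d.insert x (d.getD x 0 + 1)) PySem.Dict.empty := by
    rw [List.foldl_map]
  rw [hfold]
  have hgetD : ∀ k : Int × Int,
      (((PySem.List.enumerate answers 0).map (fun ia => (PySem.Int.mod ia.1 40, ia.2))).foldl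
          (fun (d : PySem.Dict (Int × Int) Int) x => d.insert x (d.getD x 0 + 1)) PySem.Dict.empty).getD k 0
      = (((PySem.List.enumerate answers 0).map (fun ia => (PySem.Int.mod ia.1 40, ia.2))).count k : Int) := by
    intro k
    rw [PySem.Dict.getD_foldl_insert_add_one]
    simp
  have hmaps :
      ((PySem.List.pyRange 0 40 1).map
        (fun r => (((PySem.List.enumerate answers 0).map (fun ia => (PySem.Int.mod ia.1 40, ia.2))).foldl
          (fun (d : PySem.Dict (Int × Int) Int) x => d.insert x (d.getD x 0 + 1)) PySem.Dict.empty).getD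
            (r, PySem.List.pyGetD p (PySem.Int.mod r p.length) 0) 0)).sum
      = ((PySem.List.pyRange 0 40 1).map
          (fun r => (((PySem.List.enumerate answers 0).map (fun ia => (PySem.Int.mod ia.1 40, ia.2))).count
            (r, PySem.List.pyGetD p (PySem.Int.mod r p.length) 0) : Int))).sum := by
    apply congrArg
    apply List.map_congr_left
    intro r _
    exact hgetD _
  rw [hmaps, pv_swap (fun r => PySem.List.pyGetD p (PySem.Int.mod r p.length) 0) (PySem.List.enumerate answers 0)]
  apply congrArg
  apply List.map_congr_left
  intro ia _
  rw [pv_mod_mod (p.length : Int) hL hdvd ia.1]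

-- ===== VERDICT =====
theorem solution_spec : Claim_equal_solution := by
  intro answers _
  show (let counts :=
          (PySem.List.pyRange 0 (answers.length : Int) 1).foldl
            (fun (counts : List Int) (i : Int) =>
      let counts :=
        if PySem.List.pyGetD answers i 0 = PySem.List.pyGetD [1, 2, 3, 4, 5] (PySem.Int.mod i 5) 0 then
          PySem.List.pySetD counts 0 (PySem.List.pyGetD counts 0 0 + 1)
        else counts
      let counts :=
        if PySem.List.pyGetD answers i 0 = PySem.List.pyGetD [2, 1, 2, 3, 2, 4, 2, 5] (PySem.Int.mod i 8) 0 then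
          PySem.List.pySetD counts 1 (PySem.List.pyGetD counts 1 0 + 1)
        else counts
      let counts :=
        if PySem.List.pyGetD answers i 0 = PySem.List.pyGetD [3, 3, 1, 1, 2, 2, 4, 4, 5, 5] (PySem.Int.mod i 10) 0 then
          PySem.List.pySetD counts 2 (PySem.List.pyGetD counts 2 0 + 1)
        else counts
      counts) [0, 0, 0]
        let m := (PySem.List.max? counts (fun x => x)).getD 0
        (PySem.List.enumerate counts 0).filterMap (fun ic => if ic.2 = m then some (ic.1 + 1) else none))
      = solution_alt answers
  rw [pv_counts]
  show _ = (let counts : List Int :=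
      ([[1, 2, 3, 4, 5], [2, 1, 2, 3, 2, 4, 2, 5], [3, 3, 1, 1, 2, 2, 4, 4, 5, 5]] : List (List Int)).map (fun p =>
        ((PySem.List.pyRange 0 40 1).map
          (fun r => ((PySem.List.enumerate answers 0).foldl
            (fun (d : PySem.Dict (Int × Int) Int) ia =>
              d.insert (PySem.Int.mod ia.1 40, ia.2) (d.getD (PySem.Int.mod ia.1 40, ia.2) 0 + 1))
            PySem.Dict.empty).getD (r, PySem.List.pyGetD p (PySem.Int.mod r p.length) 0) 0)).sum)
      let best := (PySem.List.max? counts (fun x => x)).getD 0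
      (PySem.List.enumerate counts 0).filterMap (fun ic => if ic.2 = best then some (ic.1 + 1) else none))
  rw [List.map_cons, List.map_cons, List.map_cons, List.map_nil]
  rw [pv_bucket answers [1, 2, 3, 4, 5] (by norm_num) (by norm_num),
      pv_bucket answers [2, 1, 2, 3, 2, 4, 2, 5] (by norm_num) (by norm_num),
      pv_bucket answers [3, 3, 1, 1, 2, 2, 4, 4, 5, 5] (by norm_num) (by norm_num)]
  norm_num
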